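-- pv_equiv track=rewrite | github.com/BenGallardBridger/Programming-Examples | Python/WordleSolver/wordleSovler.py | wordWith
-- ===== SOURCE A (Python) =====
-- def wordWith(wordList, letters):
--     newList = []
--     for word in wordList:
--         isGood = True
--         for letter in letters:
--             if letter not in word:
--                 isGood = False
--         if isGood:
--             newList.append(word)
--     return newList
-- ===== SOURCE B (Python) =====
-- def wordWith(wordList, letters):
--     # different decomposition: narrow the candidate list one letter at a time
--     result = list(wordList)
--     for letter in letters:
--         result = [w for w in result if letter in w]
--     return result
-- ===== Notes on version B (the rewrite author's own statement) =====
-- stated objective: faster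
-- what changed: Letters become the outer loop: B repeatedly filters a shrinking candidate list one letter at a time, so a word is discarded at its first failing letter, instead of A's per-word flag loop that always scans every letter.
import Mathlib
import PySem

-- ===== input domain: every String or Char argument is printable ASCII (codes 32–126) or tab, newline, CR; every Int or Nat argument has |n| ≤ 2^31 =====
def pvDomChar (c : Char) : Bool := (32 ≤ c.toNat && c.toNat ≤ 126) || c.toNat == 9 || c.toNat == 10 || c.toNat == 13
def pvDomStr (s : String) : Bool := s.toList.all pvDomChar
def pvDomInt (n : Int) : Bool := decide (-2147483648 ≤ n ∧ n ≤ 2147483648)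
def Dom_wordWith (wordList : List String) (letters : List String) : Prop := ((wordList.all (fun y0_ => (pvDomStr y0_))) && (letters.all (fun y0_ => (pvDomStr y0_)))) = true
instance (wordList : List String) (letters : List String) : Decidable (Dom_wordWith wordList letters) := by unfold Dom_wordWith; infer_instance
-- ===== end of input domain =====

-- B restructures the loop (letters outside, repeated filtering of a shrinking list); same return value.

-- ===== PORT A =====
def wordWith (wordList : List String) (letters : List String) : List String :=
  wordList.foldl (fun newList word =>
    let isGood := letters.foldl (fun g letter =>
      if !(PySem.Str.isIn letter word) then false else g) true
    if isGood then newList ++ [word] else newList) []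

-- ===== PORT B =====
def wordWith_alt (wordList : List String) (letters : List String) : List String :=
  letters.foldl (fun result letter =>
    result.filter (fun w => PySem.Str.isIn letter w)) wordList

-- ===== PRECONDITION & SPEC =====
def Spec_wordWith (wordList : List String) (letters : List String) (out : List String) : Prop := out = wordWith_alt wordList letters
instance (wordList : List String) (letters : List String) (out : List String) : Decidable (Spec_wordWith wordList letters out) := by unfold Spec_wordWith; infer_instance

-- ===== CLAIM (what is proved, stated in full; the proofs are below) =====
def Claim_equal_wordWith : Prop := ∀ (wordList : List String) (letters : List String), Dom_wordWith wordList letters → Spec_wordWith wordList letters (wordWith wordList letters)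

-- ===== LEMMAS AND PROOFS =====

-- A's inner flag loop computes "every letter is in word"
theorem inner_flag_eq_all (letters : List String) (word : String) (b : Bool) :
    letters.foldl (fun g letter => if !(PySem.Str.isIn letter word) then false else g) b
      = (b && letters.all (fun letter => PySem.Str.isIn letter word)) := by
  induction letters generalizing b with
  | nil => simp
  | cons l ls ih =>
    simp only [List.foldl_cons, List.all_cons, ih]
    cases h : PySem.Str.isIn l word <;> simp_all

-- B's repeated filtering computes one filter by the conjunction of all letters
theorem alt_eq_filter_all (letters : List String) (wordList : List String) :
    wordWith_alt wordList letters
      = wordList.filter (fun w => letters.all (fun letter => PySem.Str.isIn letter w)) := by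
  induction letters generalizing wordList with
  | nil => simp [wordWith_alt]
  | cons l ls ih =>
    simp only [wordWith_alt, List.foldl_cons] at *
    rw [ih, List.filter_filter]
    exact List.filter_congr fun w _ => Bool.and_comm _ _

-- ===== VERDICT (by name: the statement is the Claim_ definition above) =====
theorem wordWith_spec : Claim_equal_wordWith := by
  intro wordList letters _
  show wordWith wordList letters = wordWith_alt wordList letters
  rw [alt_eq_filter_all]
  unfold wordWith
  simp only [inner_flag_eq_all, Bool.true_and]
  exact PySem.List.foldl_append_if_eq_filter _ _ _
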